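-- pv_equiv track=rewrite | github.com/AnhellO/DAS_Sistemas | Ago-Dic-2017/Enrique Castillo/Ordinario/test/Lib/site-packages/reverse.py | split_size
-- ===== SOURCE A (Python) =====
-- CHUNK_SIZE = 1024 * 16
--
-- def split_size(size):
--     '''Split the file size into several chunks.'''
--     rem = size % CHUNK_SIZE
--     if rem == 0:
--         cnt = size // CHUNK_SIZE
--     else:
--         cnt = size // CHUNK_SIZE + 1
--
--     chunks = []
--     for i in range(cnt):
--         pos = i * CHUNK_SIZE
--         if i == cnt - 1:
--             disp = size - pos
--         else:
--             disp = CHUNK_SIZE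
--         chunks.append((pos, disp))
--     return chunks
-- ===== SOURCE B (Python) =====
-- CHUNK_SIZE = 1024 * 16
--
-- def split_size(size):
--     '''Split the file size into several chunks.'''
--     chunks = []
--     while size > 0:
--         pos = (size - 1) // CHUNK_SIZE * CHUNK_SIZE
--         chunks.append((pos, size - pos))
--         size = pos
--     chunks.reverse()
--     return chunks
-- ===== Notes on version B (the rewrite author's own statement) =====
-- stated objective: alternative
-- what changed: Instead of precomputing a chunk count and iterating forward over indices with a last-index branch, B peels the final chunk off the end in a while loop (pos = (size-1)//CHUNK_SIZE*CHUNK_SIZE), building the list back-to-front and reversing it once at the end.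
import Mathlib
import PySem

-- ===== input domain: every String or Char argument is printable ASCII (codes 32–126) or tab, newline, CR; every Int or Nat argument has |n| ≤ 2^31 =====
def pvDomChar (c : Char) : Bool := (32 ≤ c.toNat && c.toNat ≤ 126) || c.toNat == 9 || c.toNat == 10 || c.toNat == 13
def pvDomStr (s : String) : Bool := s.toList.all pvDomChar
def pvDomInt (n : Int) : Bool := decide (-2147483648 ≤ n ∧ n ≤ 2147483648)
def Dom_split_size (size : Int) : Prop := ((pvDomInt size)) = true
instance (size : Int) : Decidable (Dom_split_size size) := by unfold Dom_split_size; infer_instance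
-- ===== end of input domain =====

-- B replaces A's chunk-count precomputation and forward index loop (with a
-- last-index branch) by a while loop that peels the final chunk off the end,
-- building the list back-to-front and reversing it once; objective: alternative.

-- ===== PORT A =====
-- CHUNK_SIZE = 1024 * 16 = 16384
def split_size (size : Int) : List (Int × Int) :=
  let rem := PySem.Int.mod size 16384
  let cnt := if rem = 0 then PySem.Int.floordiv size 16384
             else PySem.Int.floordiv size 16384 + 1
  (PySem.List.pyRange 0 cnt 1).foldl
    (fun chunks i =>
      let pos := i * 16384
      let disp := if i = cnt - 1 then size - pos else (16384 : Int)
      chunks ++ [(pos, disp)]) []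

-- ===== PORT B =====
-- the while loop: append the last chunk, continue with the truncated size
def splitGo (size : Int) (chunks : List (Int × Int)) : List (Int × Int) :=
  if 0 < size then
    let pos := PySem.Int.floordiv (size - 1) 16384 * 16384
    splitGo pos (chunks ++ [(pos, size - pos)])
  else chunks
termination_by size.toNat
decreasing_by
  rw [PySem.Int.floordiv_eq_ediv_of_pos (by norm_num)]
  omega

def split_size_alt (size : Int) : List (Int × Int) :=
  (splitGo size []).reverse

-- ===== PRECONDITION & SPEC =====
def Spec_split_size (size : Int) (out : List (Int × Int)) : Prop := out = split_size_alt size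
instance (size : Int) (out : List (Int × Int)) : Decidable (Spec_split_size size out) := by unfold Spec_split_size; infer_instance

-- ===== CLAIM (what is proved, stated in full; the proofs are below) =====
def Claim_equal_split_size : Prop := ∀ (size : Int), Dom_split_size size → Spec_split_size size (split_size size)

-- ===== LEMMAS AND PROOFS =====

-- A on a nonpositive size produces the empty list
theorem A_nil (size : Int) (h : size ≤ 0) : split_size size = [] := by
  simp only [split_size, PySem.Int.floordiv_eq_ediv_of_pos (show (0:Int) < 16384 by norm_num),
    PySem.Int.mod_eq_emod_of_pos (show (0:Int) < 16384 by norm_num)]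
  rw [PySem.List.pyRange_one]
  have h0 : ((if size % 16384 = 0 then size / 16384 else size / 16384 + 1) - 0).toNat = 0 := by
    split_ifs <;> omega
  rw [h0]
  simp

-- characterisation of A on positive size: full chunks then the remainder chunk
theorem A_char (size : Int) (h : 0 < size) :
    split_size size =
      (List.range ((size - 1) / 16384).toNat).map (fun (i : Nat) => ((i : Int) * 16384, (16384 : Int)))
        ++ [(((size - 1) / 16384) * 16384, size - ((size - 1) / 16384) * 16384)] := by
  simp only [split_size, PySem.Int.floordiv_eq_ediv_of_pos (show (0:Int) < 16384 by norm_num),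
    PySem.Int.mod_eq_emod_of_pos (show (0:Int) < 16384 by norm_num)]
  have hcnt : (if size % 16384 = 0 then size / 16384 else size / 16384 + 1)
      = (size - 1) / 16384 + 1 := by
    split_ifs <;> omega
  rw [hcnt, PySem.List.foldl_append_singleton_eq_map, PySem.List.pyRange_one, List.map_map,
    List.nil_append]
  set q1 : Int := (size - 1) / 16384 with hq1
  have hq1n : 0 ≤ q1 := by omega
  have hN : (q1 + 1 - 0).toNat = q1.toNat + 1 := by omega
  rw [hN, List.range_succ, List.map_append]
  refine congrArg₂ (· ++ ·) ?_ ?_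
  · apply List.map_congr_left
    intro k hk
    rw [List.mem_range] at hk
    have hk' : (k : Int) < q1 := by omega
    simp only [Function.comp, zero_add, Prod.mk.injEq]
    rw [if_neg (by omega)]
    simp
  · have hc : ((q1.toNat : Int)) = q1 := by omega
    simp only [List.map_cons, List.map_nil, Function.comp, zero_add, hc]
    rw [if_pos (by omega)]

-- A on a nonnegative multiple of the chunk size: all chunks are full
theorem A_full (q1 : Int) (h : 0 ≤ q1) :
    split_size (q1 * 16384)
      = (List.range q1.toNat).map (fun (i : Nat) => ((i : Int) * 16384, (16384 : Int))) := by
  by_cases hz : q1 = 0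
  · subst hz
    rw [show ((0:Int) * 16384) = 0 from by ring, A_nil 0 le_rfl]
    simp
  · have hpos : 0 < q1 * 16384 := by omega
    rw [A_char _ hpos]
    have h1 : (q1 * 16384 - 1) / 16384 = q1 - 1 := by omega
    rw [h1]
    have h2 : q1.toNat = (q1 - 1).toNat + 1 := by omega
    rw [h2, List.range_succ, List.map_append]
    congr 1
    have hc : (((q1 - 1).toNat : Int)) = q1 - 1 := by omega
    simp only [List.map_cons, List.map_nil, hc]
    rw [show q1 * 16384 - (q1 - 1) * 16384 = 16384 from by ring]

-- peeling the last chunk off A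
theorem A_peel (size : Int) (h : 0 < size) :
    split_size size =
      split_size (((size - 1) / 16384) * 16384)
        ++ [(((size - 1) / 16384) * 16384, size - ((size - 1) / 16384) * 16384)] := by
  rw [A_char size h, A_full ((size - 1) / 16384) (by omega)]

-- one unfolding step of the while loop
theorem splitGo_pos (size : Int) (acc : List (Int × Int)) (h : 0 < size) :
    splitGo size acc
      = splitGo (PySem.Int.floordiv (size - 1) 16384 * 16384)
          (acc ++ [(PySem.Int.floordiv (size - 1) 16384 * 16384,
                    size - PySem.Int.floordiv (size - 1) 16384 * 16384)]) := by
  conv_lhs => rw [splitGo]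
  simp [h]

theorem splitGo_nonpos (size : Int) (acc : List (Int × Int)) (h : ¬ 0 < size) :
    splitGo size acc = acc := by
  conv_lhs => rw [splitGo]
  simp [h]

-- the loop accumulator factors out
theorem B_go_acc (n : Nat) : ∀ (size : Int), size.toNat ≤ n →
    ∀ acc, splitGo size acc = acc ++ splitGo size [] := by
  induction n with
  | zero =>
    intro size hle acc
    have hns : ¬ 0 < size := by omega
    rw [splitGo_nonpos size acc hns, splitGo_nonpos size [] hns]
    simp
  | succ n ih =>
    intro size hle acc
    by_cases hp : 0 < size
    · rw [splitGo_pos size acc hp, splitGo_pos size [] hp]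
      set pos := PySem.Int.floordiv (size - 1) 16384 * 16384 with hpos
      have hfd : pos = ((size - 1) / 16384) * 16384 := by
        rw [hpos, PySem.Int.floordiv_eq_ediv_of_pos (by norm_num)]
      have hlt : pos.toNat ≤ n := by omega
      rw [ih pos hlt (acc ++ [(pos, size - pos)]), ih pos hlt ([] ++ [(pos, size - pos)])]
      simp
    · rw [splitGo_nonpos size acc hp, splitGo_nonpos size [] hp]
      simp

-- the main equality, by strong induction on the truncated size
theorem B_eq_A_aux (n : Nat) : ∀ (size : Int), size.toNat ≤ n →
    split_size size = (splitGo size []).reverse := by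
  induction n with
  | zero =>
    intro size hle
    have hns : ¬ 0 < size := by omega
    rw [A_nil size (by omega), splitGo_nonpos size [] hns]
    simp
  | succ n ih =>
    intro size hle
    by_cases hp : 0 < size
    · rw [splitGo_pos size [] hp]
      set pos := PySem.Int.floordiv (size - 1) 16384 * 16384 with hpos
      have hfd : pos = ((size - 1) / 16384) * 16384 := by
        rw [hpos, PySem.Int.floordiv_eq_ediv_of_pos (by norm_num)]
      have hlt : pos.toNat ≤ n := by omega
      rw [B_go_acc n pos hlt ([] ++ [(pos, size - pos)]), List.nil_append,
        List.reverse_append, ← ih pos hlt, A_peel size hp, hfd]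
      simp
    · rw [A_nil size (by omega), splitGo_nonpos size [] hp]
      simp

theorem B_eq_A (size : Int) : split_size size = split_size_alt size := by
  unfold split_size_alt
  exact B_eq_A_aux size.toNat size le_rfl

-- ===== VERDICT (by name: the statement is the Claim_ definition above) =====
theorem split_size_spec : Claim_equal_split_size := by
  intro size _
  unfold Spec_split_size
  exact B_eq_A size
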